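-- pv_equiv track=rewrite | github.com/sdh98429/dj2_alg_study | CodeTest/Streami/s3.py | solution
-- ===== SOURCE A (Python) =====
-- def solution(A, B):
--     N = len(A)
--     space = [[] for _ in range(100001)]
--     avail = [False] + [True] * (100000)
--     for i in range(N):
--         if i in space[A[i]]:
--             avail[A[i]] = False
--         space[A[i]].append(i)
--         if i in space[B[i]]:
--             avail[B[i]] = False
--         space[B[i]].append(i)
--
--     for i in range(100001):
--         if avail[i]:
--             return i
--     else:
--         return 100001
-- ===== SOURCE B (Python) =====
-- def solution(A, B):
--     common = sorted(v for v, w in zip(A, B) if v == w)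
--     expected = 1
--     for v in common:
--         if v < expected:
--             continue
--         if v == expected:
--             expected += 1
--         else:
--             break
--     return expected
-- ===== Notes on version B (the rewrite author's own statement) =====
-- stated objective: faster
-- what changed: Replaces A's fixed 100001-slot occurrence table plus 100001-slot availability scan by collecting the values at positions where A[i]==B[i], sorting them, and walking the sorted list with an expected counter to find the smallest missing positive; Pre_ excludes inputs on which A raises IndexError and pairs that collide in A's table only through Python's negative-index wraparound with a wrapped slot small enough (<= len(A)+1) to influence the result, where A's marking is accidental.
-- outside the precondition, e.g. on solution([1], [-100000]): A returns 2, B returns 1; on solution([-100000], [-100000]): A returns 2, B returns 1; on solution([200000], [200000]): A raises IndexError, B returns 1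
-- crash fix: A raises IndexError when len(B) < len(A) or some zipped value lies outside [-100001, 100000]; B returns the smallest positive integer missing from the common values there (e.g. 1 on ([200000],[200000])). — e.g. on solution([200000], [200000]): A raises IndexError, B returns 1
import Mathlib
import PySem

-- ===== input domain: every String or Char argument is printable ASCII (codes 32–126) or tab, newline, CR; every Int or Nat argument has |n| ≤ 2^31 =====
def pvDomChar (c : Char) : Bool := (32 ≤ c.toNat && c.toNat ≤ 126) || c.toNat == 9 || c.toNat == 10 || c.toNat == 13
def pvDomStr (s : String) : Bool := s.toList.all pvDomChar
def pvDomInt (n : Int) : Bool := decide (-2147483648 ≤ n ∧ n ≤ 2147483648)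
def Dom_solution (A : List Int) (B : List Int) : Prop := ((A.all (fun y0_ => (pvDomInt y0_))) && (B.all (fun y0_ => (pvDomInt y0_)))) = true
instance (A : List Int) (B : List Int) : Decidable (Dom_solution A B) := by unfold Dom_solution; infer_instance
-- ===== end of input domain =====

-- B replaces A's fixed 100001-slot occurrence table and availability scan by sorting the common values and
-- scanning them with an expected counter (different algorithm; no fixed-size table).

-- ===== PORT A =====
-- Python list index with negative wraparound on the length-100001 lists `space`/`avail`;
-- exact for -100001 ≤ v ≤ 100000, Python raises IndexError outside (excluded by Pre_solution).
def wrapIdx (v : Int) : Nat := (if v < 0 then v + 100001 else v).toNat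

-- one iteration of A's first loop: the two membership checks / avail markings / appends, in source order
def solStep (A : List Int) (B : List Int) (st : List (List Int) × List Bool) (i : Int) :
    List (List Int) × List Bool :=
  let a := PySem.List.pyGetD A i 0      -- A[i]; exact for 0 ≤ i < len A
  let sa := st.1.getD (wrapIdx a) []
  let avail1 := if i ∈ sa then st.2.set (wrapIdx a) false else st.2
  let space1 := st.1.set (wrapIdx a) (sa ++ [i])
  let b := PySem.List.pyGetD B i 0      -- B[i]; exact for 0 ≤ i < len B (len B < len A raises, excluded by Pre_)
  let sb := space1.getD (wrapIdx b) []
  let avail2 := if i ∈ sb then avail1.set (wrapIdx b) false else avail1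
  let space2 := space1.set (wrapIdx b) (sb ++ [i])
  (space2, avail2)

def solution (A : List Int) (B : List Int) : Int :=
  match (PySem.List.pyRange 0 100001 1).find? (fun j =>
      ((PySem.List.pyRange 0 (A.length : Int) 1).foldl (solStep A B)
        (List.replicate 100001 ([] : List Int), false :: List.replicate 100000 true)).2.getD j.toNat false) with
  | some j => j
  | none => 100001

-- ===== PORT B =====
-- the `for v in common: …` loop of Source B with its break, as structural recursion on the sorted list
def mexScan (e : Int) : List Int → Int
  | [] => e
  | v :: rest => if v < e then mexScan e rest else if v = e then mexScan (e + 1) rest else e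

def solution_alt (A : List Int) (B : List Int) : Int :=
  mexScan 1 (PySem.List.sorted (((A.zip B).filter (fun p => p.1 == p.2)).map Prod.fst) (fun x => x) false)

-- ===== PRECONDITION & SPEC =====
-- Pre_ excludes (a) inputs on which A raises IndexError (len(B) < len(A), or a zipped value outside
-- [-100001, 100000]) and (b) pairs whose two values hit the same slot of A's fixed-size table only through
-- Python's negative-index wraparound (values differing by exactly 100001, or an equal negative pair) AND whose
-- wrapped slot is ≤ len(A)+1, the only slots that can influence the returned minimum; there A's
-- unavailability marking is an accident of the wraparound (collisions at larger slots stay inside Pre_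
-- and the agreement is proved for them).
def Pre_solution (A : List Int) (B : List Int) : Prop :=
  A.length ≤ B.length ∧ ∀ p ∈ A.zip B,
    -100001 ≤ p.1 ∧ p.1 ≤ 100000 ∧ -100001 ≤ p.2 ∧ p.2 ≤ 100000 ∧
    ((p.1 = p.2 + 100001 ∨ p.2 = p.1 + 100001 ∨ (p.1 = p.2 ∧ p.1 < 0)) →
      (A.length : Int) + 1 < (if p.1 < 0 then p.1 + 100001 else p.1))
instance (A : List Int) (B : List Int) : Decidable (Pre_solution A B) := by
  unfold Pre_solution; infer_instance

def pvWitness_solution : List Int × List Int := ([1, 2, 1, 5], [1, 3, 1, 5])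

-- A raises IndexError when len(B) < len(A) or some zipped value lies outside [-100001, 100000];
-- B returns the smallest positive integer missing from the common values there.
def Raises_solution (A : List Int) (B : List Int) : Prop :=
  B.length < A.length ∨ ∃ p ∈ A.zip B,
    p.1 < -100001 ∨ 100000 < p.1 ∨ p.2 < -100001 ∨ 100000 < p.2
instance (A : List Int) (B : List Int) : Decidable (Raises_solution A B) := by
  unfold Raises_solution; infer_instance
def pvRaiseWitness_solution : List Int × List Int := ([200000], [200000])
def pvRaiseWitnessOut_solution : Int := 1

def Spec_solution (A : List Int) (B : List Int) (out : Int) : Prop := out = solution_alt A B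
instance (A : List Int) (B : List Int) (out : Int) : Decidable (Spec_solution A B out) := by
  unfold Spec_solution; infer_instance

-- ===== CLAIM (what is proved, stated in full; the proofs are below) =====
def Claim_equal_solution : Prop := ∀ (A : List Int) (B : List Int),
  Dom_solution A B → Pre_solution A B → Spec_solution A B (solution A B)

def Claim_raises_solution : Prop :=
  (∀ (A : List Int) (B : List Int), Dom_solution A B → Raises_solution A B → ¬ Pre_solution A B) ∧
  (Dom_solution (pvRaiseWitness_solution.1) (pvRaiseWitness_solution.2) ∧
   Raises_solution (pvRaiseWitness_solution.1) (pvRaiseWitness_solution.2) ∧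
   solution_alt (pvRaiseWitness_solution.1) (pvRaiseWitness_solution.2) = pvRaiseWitnessOut_solution)

-- ===== LEMMAS AND PROOFS =====

-- membership in the common multiset (what B collects)
def CMem (A : List Int) (B : List Int) (m : Int) : Prop := ∃ p ∈ A.zip B, p.1 = p.2 ∧ p.1 = m

-- slot membership: some pair collides (possibly via wraparound) at table slot j (what A marks)
def SMem (A : List Int) (B : List Int) (j : Nat) : Prop :=
  ∃ p ∈ A.zip B, wrapIdx p.1 = wrapIdx p.2 ∧ wrapIdx p.2 = j

-- the characterisation both results satisfy; unique
def IsAns (A : List Int) (B : List Int) (r : Int) : Prop :=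
  (1 ≤ r ∧ r ≤ 100001) ∧ (r ≤ 100000 → ¬ SMem A B r.toNat) ∧
    (∀ m, 1 ≤ m → m < r → SMem A B m.toNat)

theorem isAns_unique (A B : List Int) (r r' : Int) (h : IsAns A B r) (h' : IsAns A B r') : r = r' := by
  obtain ⟨⟨h1, h2⟩, h3, h4⟩ := h
  obtain ⟨⟨h1', h2'⟩, h3', h4'⟩ := h'
  rcases lt_trichotomy r r' with hlt | heq | hgt
  · exact absurd (h4' r h1 hlt) (h3 (by omega))
  · exact heq
  · exact absurd (h4 r' h1' hgt) (h3' (by omega))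

-- a pair of values inside A's index range
def RangePair (p : Int × Int) : Prop :=
  -100001 ≤ p.1 ∧ p.1 ≤ 100000 ∧ -100001 ≤ p.2 ∧ p.2 ≤ 100000

theorem wrap_eq_toNat (v : Int) (h : 0 ≤ v) : wrapIdx v = v.toNat := by
  unfold wrapIdx
  rw [if_neg (by omega)]

theorem collide_cases (p : Int × Int) (hp : RangePair p) (hc : wrapIdx p.1 = wrapIdx p.2) :
    (p.1 = p.2 ∧ 0 ≤ p.1) ∨
      (p.1 = p.2 + 100001 ∨ p.2 = p.1 + 100001 ∨ (p.1 = p.2 ∧ p.1 < 0)) := by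
  obtain ⟨h1, h2, h3, h4⟩ := hp
  unfold wrapIdx at hc
  split_ifs at hc <;> omega

-- sorted-scan lemma for B's loop
theorem mexScan_spec (l : List Int) (e : Int) (hs : l.Pairwise (· ≤ ·)) :
    e ≤ mexScan e l ∧ mexScan e l ∉ l ∧ ∀ m, e ≤ m → m < mexScan e l → m ∈ l := by
  induction l generalizing e with
  | nil =>
    refine ⟨le_refl e, by simp [mexScan], ?_⟩
    intro m h1 h2; simp only [mexScan] at h2; omega
  | cons v rest ih =>
    have hrest : rest.Pairwise (· ≤ ·) := hs.of_cons
    have hv : ∀ y ∈ rest, v ≤ y := fun y hy => List.rel_of_pairwise_cons hs hy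
    by_cases hlt : v < e
    · obtain ⟨i1, i2, i3⟩ := ih e hrest
      refine ⟨by simpa [mexScan, hlt] using i1, ?_, ?_⟩
      · simp only [mexScan, if_pos hlt]
        intro hmem
        rcases List.mem_cons.1 hmem with h | h
        · omega
        · exact i2 h
      · intro m hm1 hm2
        simp only [mexScan, if_pos hlt] at hm2
        exact List.mem_cons_of_mem v (i3 m hm1 hm2)
    · by_cases heq : v = e
      · obtain ⟨i1, i2, i3⟩ := ih (e + 1) hrest
        refine ⟨?_, ?_, ?_⟩
        · simp only [mexScan, if_neg hlt, if_pos heq]; omega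
        · simp only [mexScan, if_neg hlt, if_pos heq]
          intro hmem
          rcases List.mem_cons.1 hmem with h | h
          · omega
          · exact i2 h
        · intro m hm1 hm2
          simp only [mexScan, if_neg hlt, if_pos heq] at hm2
          rcases eq_or_lt_of_le hm1 with h | h
          · exact List.mem_cons.2 (Or.inl (by omega))
          · exact List.mem_cons_of_mem v (i3 m (by omega) hm2)
      · refine ⟨?_, ?_, ?_⟩
        · simp [mexScan, hlt, heq]
        · simp only [mexScan, if_neg hlt, if_neg heq]
          intro hmem
          rcases List.mem_cons.1 hmem with h | h
          · exact heq h.symm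
          · have := hv e h; omega
        · intro m hm1 hm2
          simp only [mexScan, if_neg hlt, if_neg heq] at hm2
          omega

-- find? over a range
theorem find_pyRange_spec (a b : Int) (f : Int → Bool) :
    (∀ j, (PySem.List.pyRange a b 1).find? f = some j →
      a ≤ j ∧ j < b ∧ f j = true ∧ ∀ m, a ≤ m → m < j → f m = false) ∧
    ((PySem.List.pyRange a b 1).find? f = none → ∀ m, a ≤ m → m < b → f m = false) := by
  by_cases hab : b ≤ a
  · rw [PySem.List.pyRange_one_eq_nil hab]
    exact ⟨by intro j h; simp at h, by intros; omega⟩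
  · have hlen : (b - (a + 1)).toNat < (b - a).toNat := by omega
    obtain ⟨ih1, ih2⟩ := find_pyRange_spec (a + 1) b f
    rw [PySem.List.pyRange_one_cons (by omega)]
    constructor
    · intro j hj
      cases hfa : f a with
      | true =>
        rw [List.find?_cons_of_pos hfa] at hj
        have hja : a = j := Option.some.inj hj
        refine ⟨by omega, by omega, by rw [← hja]; exact hfa, by intro m h1 h2; omega⟩
      | false =>
        rw [List.find?_cons_of_neg (by simp [hfa])] at hj
        obtain ⟨j1, j2, j3, j4⟩ := ih1 j hj
        refine ⟨by omega, j2, j3, ?_⟩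
        intro m hm1 hm2
        rcases eq_or_lt_of_le hm1 with h | h
        · rw [← h]; exact hfa
        · exact j4 m (by omega) hm2
    · intro hn m hm1 hm2
      cases hfa : f a with
      | true => rw [List.find?_cons_of_pos hfa] at hn; exact absurd hn (by simp)
      | false =>
        rw [List.find?_cons_of_neg (by simp [hfa])] at hn
        rcases eq_or_lt_of_le hm1 with h | h
        · rw [← h]; exact hfa
        · exact ih2 hn m (by omega) hm2
termination_by (b - a).toNat


-- B-side step, with the pair values in place of the A[i]/B[i] lookups (used only by the proofs)
def step' (st : List (List Int) × List Bool) (ip : Int × (Int × Int)) : List (List Int) × List Bool :=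
  let sa := st.1.getD (wrapIdx ip.2.1) []
  let avail1 := if ip.1 ∈ sa then st.2.set (wrapIdx ip.2.1) false else st.2
  let space1 := st.1.set (wrapIdx ip.2.1) (sa ++ [ip.1])
  let sb := space1.getD (wrapIdx ip.2.2) []
  let avail2 := if ip.1 ∈ sb then avail1.set (wrapIdx ip.2.2) false else avail1
  let space2 := space1.set (wrapIdx ip.2.2) (sb ++ [ip.1])
  (space2, avail2)

theorem wrap_lt (p : Int × Int) (hp : RangePair p) :
    wrapIdx p.1 < 100001 ∧ wrapIdx p.2 < 100001 := by
  obtain ⟨h1, h2, h3, h4⟩ := hp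
  unfold wrapIdx
  constructor <;> split_ifs <;> omega

theorem getD_set_bool (l : List Bool) (i j : Nat) (a : Bool) (hi : i < l.length) :
    (l.set i a).getD j false = if j = i then a else l.getD j false := by
  rw [List.getD_eq_getElem?_getD, List.getD_eq_getElem?_getD, List.getElem?_set]
  by_cases h : i = j
  · subst h
    rw [if_pos rfl, if_pos hi, if_pos rfl]
    rfl
  · rw [if_neg h, if_neg (fun hh => h hh.symm)]

theorem step'_spec (p : Int × Int) (k : Int) (space : List (List Int)) (avail : List Bool)
    (hp : RangePair p) (hsl : space.length = 100001) (hal : avail.length = 100001)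
    (hb : ∀ s ∈ space, ∀ x ∈ s, x < k) :
    (step' (space, avail) (k, p)).1.length = 100001 ∧
    (step' (space, avail) (k, p)).2.length = 100001 ∧
    (∀ s ∈ (step' (space, avail) (k, p)).1, ∀ x ∈ s, x < k + 1) ∧
    (∀ j : Nat, (step' (space, avail) (k, p)).2.getD j false =
      (avail.getD j false && !(decide (wrapIdx p.1 = wrapIdx p.2) && decide (wrapIdx p.2 = j)))) := by
  obtain ⟨hw1, hw2⟩ := wrap_lt p hp
  have hsa : space.getD (wrapIdx p.1) [] = space[wrapIdx p.1] :=
    List.getD_eq_getElem _ _ (by omega)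
  have hsamem : space.getD (wrapIdx p.1) [] ∈ space := by
    rw [hsa]; exact List.getElem_mem _
  have hknot : k ∉ space.getD (wrapIdx p.1) [] := by
    intro hk
    have := hb _ hsamem k hk
    omega
  by_cases hcol : wrapIdx p.2 = wrapIdx p.1
  · -- the two values hit the same table slot: the second membership test fires and marks it
    have hsb : (space.set (wrapIdx p.1) (space.getD (wrapIdx p.1) [] ++ [k])).getD (wrapIdx p.2) []
        = space.getD (wrapIdx p.1) [] ++ [k] := by
      rw [hcol, List.getD_eq_getElem _ _ (by rw [List.length_set]; omega), List.getElem_set_self]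
    have hin : k ∈ space.getD (wrapIdx p.1) [] ++ [k] := by simp
    simp only [step', if_neg hknot, hsb, if_pos hin]
    refine ⟨by simp [hsl], by simp [hal], ?_, ?_⟩
    · intro s hs x hx
      rcases List.mem_or_eq_of_mem_set hs with hs' | hs'
      · rcases List.mem_or_eq_of_mem_set hs' with hs'' | hs''
        · have := hb s hs'' x hx; omega
        · subst hs''
          rcases List.mem_append.1 hx with h | h
          · have := hb _ hsamem x h; omega
          · simp at h; omega
      · subst hs'
        rcases List.mem_append.1 hx with h | h
        · rcases List.mem_append.1 h with h' | h'
          · have := hb _ hsamem x h'; omega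
          · simp at h'; omega
        · simp at h; omega
    · intro j
      rw [getD_set_bool _ _ _ _ (by omega)]
      have hd1 : decide (wrapIdx p.1 = wrapIdx p.2) = true := decide_eq_true hcol.symm
      by_cases hj : j = wrapIdx p.2
      · rw [if_pos hj]
        have hd2 : decide (wrapIdx p.2 = j) = true := decide_eq_true hj.symm
        simp [hd1, hd2]
      · rw [if_neg hj]
        have hd2 : decide (wrapIdx p.2 = j) = false := decide_eq_false (fun hh => hj hh.symm)
        simp [hd2]
  · -- distinct slots: neither membership test fires, nothing is marked
    have hsb : (space.set (wrapIdx p.1) (space.getD (wrapIdx p.1) [] ++ [k])).getD (wrapIdx p.2) []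
        = space.getD (wrapIdx p.2) [] := by
      rw [List.getD_eq_getElem?_getD, List.getElem?_set, if_neg (by omega)]
      exact List.getD_eq_getElem?_getD.symm
    have hsbmem : space.getD (wrapIdx p.2) [] ∈ space := by
      rw [List.getD_eq_getElem _ _ (by omega)]; exact List.getElem_mem _
    have hknot2 : k ∉ space.getD (wrapIdx p.2) [] := by
      intro hk
      have := hb _ hsbmem k hk
      omega
    simp only [step', if_neg hknot, hsb, if_neg hknot2]
    refine ⟨by simp [hsl], by simp [hal], ?_, ?_⟩
    · intro s hs x hx
      rcases List.mem_or_eq_of_mem_set hs with hs' | hs'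
      · rcases List.mem_or_eq_of_mem_set hs' with hs'' | hs''
        · have := hb s hs'' x hx; omega
        · subst hs''
          rcases List.mem_append.1 hx with h | h
          · have := hb _ hsamem x h; omega
          · simp at h; omega
      · subst hs'
        rcases List.mem_append.1 hx with h | h
        · have := hb _ hsbmem x h; omega
        · simp at h; omega
    · intro j
      have hd1 : decide (wrapIdx p.1 = wrapIdx p.2) = false :=
        decide_eq_false (fun hh => hcol hh.symm)
      simp [hd1]

theorem loop_inv (l : List (Int × Int)) :
    ∀ (k : Int) (space : List (List Int)) (avail : List Bool),
    space.length = 100001 → avail.length = 100001 →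
    (∀ s ∈ space, ∀ x ∈ s, x < k) →
    (∀ p ∈ l, RangePair p) →
    ∀ j : Nat,
      ((PySem.List.enumerate l k).foldl step' (space, avail)).2.getD j false =
        (avail.getD j false &&
          !(l.any (fun p => decide (wrapIdx p.1 = wrapIdx p.2) && decide (wrapIdx p.2 = j)))) := by
  induction l with
  | nil =>
    intro k space avail _ _ _ _ j
    simp [PySem.List.enumerate]
  | cons p l ih =>
    intro k space avail hsl hal hb hg j
    obtain ⟨s1, s2, s3, s4⟩ := step'_spec p k space avail (hg p List.mem_cons_self) hsl hal hb
    rw [PySem.List.enumerate_cons, List.foldl_cons]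
    have hst : step' (space, avail) (k, p) =
        ((step' (space, avail) (k, p)).1, (step' (space, avail) (k, p)).2) := rfl
    rw [hst, ih (k + 1) _ _ s1 s2 s3 (fun q hq => hg q (List.mem_cons_of_mem p hq)) j, s4,
      List.any_cons]
    cases avail.getD j false <;>
      cases hx : (decide (wrapIdx p.1 = wrapIdx p.2) && decide (wrapIdx p.2 = j)) <;>
      cases hy : l.any (fun p => decide (wrapIdx p.1 = wrapIdx p.2) && decide (wrapIdx p.2 = j)) <;>
      simp

theorem fold_eq (A B : List Int) (h : A.length ≤ B.length)
    (init : List (List Int) × List Bool) :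
    (PySem.List.pyRange 0 (A.length : Int) 1).foldl (solStep A B) init
      = (PySem.List.enumerate (A.zip B)).foldl step' init := by
  have hlen : (A.zip B).length = A.length := by rw [List.length_zip]; omega
  rw [PySem.List.enumerate_eq_map_pyRange (A.zip B) (0, 0), List.foldl_map]
  simp only [PySem.List.len_eq, hlen]
  refine (PySem.List.foldl_congr_mem' _ _ _ _ ?_).symm
  intro i hi acc
  obtain ⟨hi0, hi1⟩ := PySem.List.mem_pyRange_one.1 hi
  have hiz : i < ((A.zip B).length : Int) := by omega
  have hzip : PySem.List.pyGetD (A.zip B) i (0, 0) = (A[i.toNat]'(by omega), B[i.toNat]'(by omega)) := by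
    rw [PySem.List.pyGetD_eq_getElem (A.zip B) (0, 0) hi0 hiz]
    exact List.getElem_zip ..
  have hA : PySem.List.pyGetD A i 0 = A[i.toNat]'(by omega) :=
    PySem.List.pyGetD_eq_getElem A 0 hi0 (by omega)
  have hB : PySem.List.pyGetD B i 0 = B[i.toNat]'(by omega) :=
    PySem.List.pyGetD_eq_getElem B 0 hi0 (by omega)
  simp only [step', solStep, hzip, hA, hB]

theorem init_avail (j : Nat) :
    (false :: List.replicate 100000 true).getD j false = decide (1 ≤ j ∧ j ≤ 100000) := by
  cases j with
  | zero =>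
    rw [List.getD_cons_zero]
    exact (decide_eq_false (by omega)).symm
  | succ n =>
    rw [List.getD_cons_succ]
    by_cases hn : n < 100000
    · rw [List.getD_eq_getElem _ _ (by rw [List.length_replicate]; omega), List.getElem_replicate]
      exact (decide_eq_true (by omega)).symm
    · rw [List.getD_eq_default _ _ (by rw [List.length_replicate]; omega)]
      exact (decide_eq_false (by omega)).symm

theorem any_slot (L : List (Int × Int)) (j : Nat) :
    (L.any (fun p => decide (wrapIdx p.1 = wrapIdx p.2) && decide (wrapIdx p.2 = j)) = true) ↔
      ∃ p ∈ L, wrapIdx p.1 = wrapIdx p.2 ∧ wrapIdx p.2 = j := by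
  simp [List.any_eq_true]

theorem cmem_bound (A B : List Int) (hpre : Pre_solution A B) (m : Int) (hm : CMem A B m) :
    m ≤ 100000 := by
  obtain ⟨p, hp, h1, h2⟩ := hm
  obtain ⟨_, hgood⟩ := hpre
  obtain ⟨g1, g2, g3, g4, _⟩ := hgood p hp
  omega

-- pigeonhole: if every integer in [1, r) lies in l, then r ≤ len(l) + 1
theorem range_subset_length (r : Int) (l : List Int)
    (h : ∀ m : Int, 1 ≤ m → m < r → m ∈ l) : r ≤ (l.length : Int) + 1 := by
  by_contra hgt
  have hsub : PySem.List.pyRange 1 r 1 ⊆ l := by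
    intro x hx
    obtain ⟨hx1, hx2⟩ := PySem.List.mem_pyRange_one.1 hx
    exact h x hx1 hx2
  have hnd : (PySem.List.pyRange 1 r 1).Nodup := PySem.List.nodup_pyRange_one ..
  have hcard : (PySem.List.pyRange 1 r 1).length ≤ l.length := by
    calc (PySem.List.pyRange 1 r 1).length = (PySem.List.pyRange 1 r 1).toFinset.card :=
          (List.toFinset_card_of_nodup hnd).symm
      _ ≤ l.toFinset.card := Finset.card_le_card (fun x hx =>
          List.mem_toFinset.2 (hsub (List.mem_toFinset.1 hx)))
      _ ≤ l.length := l.toFinset_card_le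
  rw [PySem.List.length_pyRange_one] at hcard
  omega

theorem solution_isAns (A B : List Int) (hpre : Pre_solution A B) :
    IsAns A B (solution A B) := by
  obtain ⟨hlen, hgood⟩ := hpre
  have hgood' : ∀ p ∈ A.zip B, RangePair p := by
    intro p hp
    obtain ⟨g1, g2, g3, g4, _⟩ := hgood p hp
    exact ⟨g1, g2, g3, g4⟩
  have hfold := fold_eq A B hlen (List.replicate 100001 ([] : List Int), false :: List.replicate 100000 true)
  have havail : ∀ j : Nat,
      ((PySem.List.pyRange 0 (A.length : Int) 1).foldl (solStep A B)
        (List.replicate 100001 ([] : List Int), false :: List.replicate 100000 true)).2.getD j false =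
      (decide (1 ≤ j ∧ j ≤ 100000) &&
        !((A.zip B).any (fun p => decide (wrapIdx p.1 = wrapIdx p.2) && decide (wrapIdx p.2 = j)))) := by
    intro j
    rw [hfold, loop_inv (A.zip B) 0 _ _ (by rw [List.length_replicate])
      (by rw [List.length_cons, List.length_replicate]) ?_ hgood' j, init_avail]
    intro s hs x hx
    rw [List.eq_of_mem_replicate hs] at hx
    simp at hx
  have hchar : ∀ i : Int, 0 ≤ i → i ≤ 100000 →
      ((((PySem.List.pyRange 0 (A.length : Int) 1).foldl (solStep A B)
        (List.replicate 100001 ([] : List Int), false :: List.replicate 100000 true)).2.getD i.toNat false) = true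
        ↔ (1 ≤ i ∧ ¬ SMem A B i.toNat)) := by
    intro i h0 h1
    rw [havail i.toNat]
    simp only [Bool.and_eq_true, Bool.not_eq_eq_eq_not, Bool.not_true,
      ← Bool.not_eq_true ((A.zip B).any _), decide_eq_true_eq]
    rw [any_slot (A.zip B) i.toNat]
    unfold SMem
    constructor
    · rintro ⟨⟨ha, hb⟩, hc⟩; exact ⟨by omega, hc⟩
    · rintro ⟨ha, hc⟩; exact ⟨⟨by omega, by omega⟩, hc⟩
  obtain ⟨hsome, hnone⟩ := find_pyRange_spec 0 100001
    (fun i => (((PySem.List.pyRange 0 (A.length : Int) 1).foldl (solStep A B)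
        (List.replicate 100001 ([] : List Int), false :: List.replicate 100000 true)).2.getD i.toNat false))
  unfold solution
  split
  next j hfind =>
    obtain ⟨j0, j1, j2, j3⟩ := hsome j hfind
    obtain ⟨jge, jnc⟩ := (hchar j j0 (by omega)).1 j2
    refine ⟨⟨jge, by omega⟩, fun _ => jnc, ?_⟩
    intro m hm1 hm2
    have hm0 : (0 : Int) ≤ m := by omega
    have := j3 m hm0 hm2
    by_contra hnc
    have : (((PySem.List.pyRange 0 (A.length : Int) 1).foldl (solStep A B)
        (List.replicate 100001 ([] : List Int), false :: List.replicate 100000 true)).2.getD m.toNat false) = true :=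
      (hchar m hm0 (by omega)).2 ⟨hm1, hnc⟩
    rw [j3 m hm0 hm2] at this
    exact Bool.false_ne_true this
  next hfind =>
    refine ⟨⟨by omega, le_refl _⟩, by omega, ?_⟩
    intro m hm1 hm2
    by_contra hnc
    have : (((PySem.List.pyRange 0 (A.length : Int) 1).foldl (solStep A B)
        (List.replicate 100001 ([] : List Int), false :: List.replicate 100000 true)).2.getD m.toNat false) = true :=
      (hchar m (by omega) (by omega)).2 ⟨hm1, hnc⟩
    rw [hnone hfind m (by omega) (by omega)] at this
    exact Bool.false_ne_true this

theorem alt_isAns (A B : List Int) (hpre : Pre_solution A B) :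
    IsAns A B (solution_alt A B) := by
  obtain ⟨hlen, hgood⟩ := hpre
  have hs : (PySem.List.sorted (((A.zip B).filter (fun p => p.1 == p.2)).map Prod.fst)
      (fun x => x) false).Pairwise (· ≤ ·) := by
    have := PySem.List.sorted_pairwise (((A.zip B).filter (fun p => p.1 == p.2)).map Prod.fst)
      (fun x => x)
    simpa using this
  have hmem : ∀ m : Int, m ∈ PySem.List.sorted (((A.zip B).filter (fun p => p.1 == p.2)).map Prod.fst)
      (fun x => x) false ↔ CMem A B m := by
    intro m
    rw [PySem.List.mem_sorted]
    unfold CMem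
    simp only [List.mem_map, List.mem_filter, beq_iff_eq]
    constructor
    · rintro ⟨p, ⟨hp, he⟩, hm⟩; exact ⟨p, hp, he, hm⟩
    · rintro ⟨p, hp, he, hm⟩; exact ⟨p, ⟨hp, he⟩, hm⟩
  have hlenC : ((PySem.List.sorted (((A.zip B).filter (fun p => p.1 == p.2)).map Prod.fst)
      (fun x => x) false).length : Int) ≤ (A.length : Int) := by
    rw [PySem.List.length_sorted, List.length_map]
    have h1 := List.length_filter_le (fun p : Int × Int => p.1 == p.2) (A.zip B)
    have h2 : (A.zip B).length = A.length := by rw [List.length_zip]; omega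
    omega
  obtain ⟨m1, m2, m3⟩ := mexScan_spec _ 1 hs
  unfold solution_alt
  have hub : mexScan 1 (PySem.List.sorted (((A.zip B).filter (fun p => p.1 == p.2)).map Prod.fst)
      (fun x => x) false) ≤ 100001 := by
    by_contra hgt
    have := cmem_bound A B ⟨hlen, hgood⟩ 100001
      ((hmem 100001).1 (m3 100001 (by omega) (by omega)))
    omega
  refine ⟨⟨m1, hub⟩, ?_, ?_⟩
  · -- the returned value is not a marked slot
    intro hle hsm
    obtain ⟨p, hp, hc1, hc2⟩ := hsm
    obtain ⟨g1, g2, g3, g4, gimp⟩ := hgood p hp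
    rcases collide_cases p ⟨g1, g2, g3, g4⟩ hc1 with ⟨heq, hge⟩ | hbad
    · -- a genuine common value equal to the result: contradicts mexScan ∉ list
      have hv : p.2 = mexScan 1 (PySem.List.sorted (((A.zip B).filter (fun p => p.1 == p.2)).map Prod.fst)
          (fun x => x) false) := by
        rw [wrap_eq_toNat p.2 (by omega)] at hc2
        omega
      exact m2 ((hmem _).2 ⟨p, hp, heq, by omega⟩)
    · -- a wraparound collision: Pre_ puts its slot above len(A)+1, but the result is ≤ len(A)+1
      have hslot := gimp hbad
      have hr : (A.length : Int) + 1 < mexScan 1 (PySem.List.sorted (((A.zip B).filter (fun p => p.1 == p.2)).map Prod.fst)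
          (fun x => x) false) := by
        unfold wrapIdx at hc1 hc2
        split_ifs at hc1 hc2 hslot <;> omega
      have hbound := range_subset_length
        (mexScan 1 (PySem.List.sorted (((A.zip B).filter (fun p => p.1 == p.2)).map Prod.fst)
          (fun x => x) false)) _ (fun m hm1 hm2 => m3 m hm1 hm2)
      omega
  · -- everything below the returned value is a marked slot
    intro m hm1 hm2
    obtain ⟨p, hp, he, hv⟩ := (hmem m).1 (m3 m hm1 hm2)
    refine ⟨p, hp, by rw [he], ?_⟩
    rw [wrap_eq_toNat p.2 (by omega)]
    omega

-- ===== VERDICT (by name: the statement is the Claim_ definition above) =====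
theorem solution_spec : Claim_equal_solution := by
  intro A B _ hpre
  unfold Spec_solution
  exact isAns_unique A B _ _ (solution_isAns A B hpre) (alt_isAns A B hpre)

@[simp] theorem solution_raises : Claim_raises_solution := by
  unfold Claim_raises_solution
  refine ⟨?_, by decide⟩
  intro A B _ hr hp
  obtain ⟨hlen, hall⟩ := hp
  rcases hr with h | ⟨p, hmem, hout⟩
  · omega
  · obtain ⟨g1, g2, g3, g4, _⟩ := hall p hmem
    omega
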